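-- pv_equiv track=rewrite | github.com/AK-1121/different_tasks | yandex_ru/02/check_with_if.py | check_login
-- ===== SOURCE A (Python) =====
-- from string import ascii_letters, digits
--
-- def check_login(login):
--     if not 0 < len(login) < 21: return False
--     if login[0] not in ascii_letters: return False
--     if login[-1] not in ascii_letters + digits: return False
--
--     allowed_inner_chars = ascii_letters + digits + '.-'
--     for i in range(1, len(login)-1):
--         if login[i] not in allowed_inner_chars: return False
--
--     return True
-- ===== SOURCE B (Python) =====
-- from string import ascii_letters, digits
--
-- def check_login(login):
--     if not 0 < len(login) < 21:
--         return False
--     letters = set(ascii_letters)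
--     alnum = letters | set(digits)
--     inner = alnum | set('.-')
--     # DFA: 0 = start, 1 = accepting (last char alnum), 2 = ends with '.'/'-', 3 = dead
--     state = 0
--     for c in login:
--         if state == 0:
--             state = 1 if c in letters else 3
--         elif state == 3:
--             break
--         else:
--             state = 1 if c in alnum else (2 if c in inner else 3)
--     return state == 1
-- ===== Notes on version B (the rewrite author's own statement) =====
-- stated objective: alternative
-- what changed: Replaces A's staged positional checks (length guard, first-char test, last-char test, then an index loop over the interior) by a single left-to-right pass of a 4-state finite automaton (start / last-char-alnum / last-char-separator / dead) folded over the characters, accepting iff it ends in the alnum state.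
import Mathlib
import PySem

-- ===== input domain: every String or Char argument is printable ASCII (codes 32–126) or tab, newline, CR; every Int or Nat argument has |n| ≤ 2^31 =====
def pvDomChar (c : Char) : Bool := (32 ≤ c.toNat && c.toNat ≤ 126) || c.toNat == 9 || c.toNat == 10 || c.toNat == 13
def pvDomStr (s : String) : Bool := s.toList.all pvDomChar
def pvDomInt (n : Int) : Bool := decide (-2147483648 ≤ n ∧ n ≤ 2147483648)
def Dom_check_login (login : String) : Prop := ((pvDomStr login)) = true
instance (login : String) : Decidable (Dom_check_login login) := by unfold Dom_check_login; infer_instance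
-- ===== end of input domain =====

-- B replaces A's staged positional membership checks (first/last/indexed interior loop) by a
-- single-pass 4-state DFA folded over the characters (alternative algorithm, same cost).


-- ===== PORT A =====
-- string.ascii_letters and string.digits, as character lists
def pvAsciiLetters : List Char := ['a','b','c','d','e','f','g','h','i','j','k','l','m','n','o','p','q','r','s','t','u','v','w','x','y','z','A','B','C','D','E','F','G','H','I','J','K','L','M','N','O','P','Q','R','S','T','U','V','W','X','Y','Z']
def pvDigits : List Char := ['0','1','2','3','4','5','6','7','8','9']

def check_login (login : String) : Bool :=
  let cs := login.toList
  if !(0 < cs.length && cs.length < 21) then false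
  else if !(pvAsciiLetters.contains (PySem.List.pyGetD cs 0 'a')) then false
  else if !((pvAsciiLetters ++ pvDigits).contains (PySem.List.pyGetD cs (-1) 'a')) then false
  else
    let allowed_inner_chars := pvAsciiLetters ++ pvDigits ++ ['.', '-']
    (PySem.List.pyRange 1 ((cs.length : Int) - 1) 1).all
      (fun i => allowed_inner_chars.contains (PySem.List.pyGetD cs i 'a'))

-- ===== PORT B =====
-- Source B's sets letters / alnum / inner hold exactly these distinct characters; only membership is
-- used, so they are ported as the duplicate-free character lists (membership is exact).
def pvLetters : List Char := pvAsciiLetters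
def pvAlnum : List Char := pvAsciiLetters ++ pvDigits
def pvInner : List Char := pvAsciiLetters ++ pvDigits ++ ['.', '-']

-- the loop body of Source B's DFA; 'break' on the dead state 3 is the absorbing case 'state stays 3'
def pvStep (s : Int) (c : Char) : Int :=
  if s == 0 then (if pvLetters.contains c then 1 else 3)
  else if s == 3 then s
  else if pvAlnum.contains c then 1 else if pvInner.contains c then 2 else 3

def check_login_alt (login : String) : Bool :=
  let cs := login.toList
  if !(0 < cs.length && cs.length < 21) then false
  else (cs.foldl pvStep 0) == 1

-- ===== PRECONDITION & SPEC =====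
def Spec_check_login (login : String) (out : Bool) : Prop := out = check_login_alt login
instance (login : String) (out : Bool) : Decidable (Spec_check_login login out) := by unfold Spec_check_login; infer_instance

-- ===== CLAIM (what is proved, stated in full; the proofs are below) =====
def Claim_equal_check_login : Prop := ∀ (login : String), Dom_check_login login → Spec_check_login login (check_login login)

-- ===== LEMMAS AND PROOFS =====

theorem pv_alnum_of_letters (c : Char) (h : pvLetters.contains c = true) :
    pvAlnum.contains c = true := by
  simp only [pvAlnum, List.contains_eq_mem, List.mem_append, decide_eq_true_eq] at *
  exact Or.inl h

theorem pv_inner_of_alnum (c : Char) (h : pvAlnum.contains c = true) :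
    pvInner.contains c = true := by
  simp only [pvAlnum, pvInner, List.contains_eq_mem, List.mem_append, decide_eq_true_eq] at *
  tauto

-- state 3 is absorbing
theorem pv_run3 (cs : List Char) : cs.foldl pvStep 3 = 3 := by
  induction cs with
  | nil => rfl
  | cons c t ih => simpa [pvStep] using ih

-- characterization of the DFA run from a live non-initial state
theorem pv_run12 (cs : List Char) (s : Int) (hs : s = 1 ∨ s = 2) :
    (cs.foldl pvStep s = 1) ↔
      ((∀ c ∈ cs, pvInner.contains c = true) ∧
       (match cs.getLast? with
        | none => s = 1
        | some c => pvAlnum.contains c = true)) := by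
  induction cs generalizing s with
  | nil =>
    simp only [List.foldl_nil, List.not_mem_nil, List.getLast?_nil]
    constructor
    · intro h; exact ⟨by intro c hc; exact absurd hc (by simp), h⟩
    · intro h; exact h.2
  | cons c t ih =>
    have hs0 : ¬ (s == 0) = true := by rcases hs with rfl | rfl <;> decide
    have hs3 : ¬ (s == 3) = true := by rcases hs with rfl | rfl <;> decide
    rw [List.foldl_cons]
    by_cases ha : pvAlnum.contains c = true
    · have ha' : c ∈ pvAlnum := by simpa [List.contains_eq_mem] using ha
      have hstep : pvStep s c = 1 := by simp [pvStep, hs0, hs3, ha']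
      rw [hstep, ih 1 (Or.inl rfl)]
      have hinner := pv_inner_of_alnum c ha
      have hinner' : c ∈ pvInner := by simpa [List.contains_eq_mem] using hinner
      cases t with
      | nil => simp [hinner', ha']
      | cons c' t' =>
        simp only [List.getLast?_cons_cons, List.mem_cons]
        constructor
        · rintro ⟨h1, h2⟩
          exact ⟨by rintro x (rfl | hx); exact hinner; exact h1 x (by simpa using hx), h2⟩
        · rintro ⟨h1, h2⟩
          exact ⟨by intro x hx; exact h1 x (by simp [hx]), h2⟩
    · by_cases hin : pvInner.contains c = true
      · have ha' : c ∉ pvAlnum := by simpa [List.contains_eq_mem] using ha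
        have hin' : c ∈ pvInner := by simpa [List.contains_eq_mem] using hin
        have hstep : pvStep s c = 2 := by simp [pvStep, hs0, hs3, ha', hin']
        rw [hstep, ih 2 (Or.inr rfl)]
        cases t with
        | nil =>
          simp only [List.getLast?_singleton, List.mem_singleton]
          constructor
          · rintro ⟨-, h⟩; simp at h
          · rintro ⟨-, h⟩; exact absurd h ha
        | cons c' t' =>
          simp only [List.getLast?_cons_cons, List.mem_cons]
          constructor
          · rintro ⟨h1, h2⟩
            exact ⟨by rintro x (rfl | hx); exact hin; exact h1 x (by simpa using hx), h2⟩
          · rintro ⟨h1, h2⟩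
            exact ⟨by intro x hx; exact h1 x (by simp [hx]), h2⟩
      · have ha' : c ∉ pvAlnum := by simpa [List.contains_eq_mem] using ha
        have hin' : c ∉ pvInner := by simpa [List.contains_eq_mem] using hin
        have hstep : pvStep s c = 3 := by simp [pvStep, hs0, hs3, ha', hin']
        rw [hstep, pv_run3]
        constructor
        · intro h; exact absurd h (by decide)
        · rintro ⟨h1, _⟩; exact absurd (h1 c (by simp)) hin

-- the core equality on the character list, lengths already admitted
theorem pv_core (cs : List Char) (h1 : 0 < cs.length) (h2 : cs.length < 21) :
    (if !(pvAsciiLetters.contains (PySem.List.pyGetD cs 0 'a')) then false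
     else if !((pvAsciiLetters ++ pvDigits).contains (PySem.List.pyGetD cs (-1) 'a')) then false
     else (PySem.List.pyRange 1 ((cs.length : Int) - 1) 1).all
       (fun i => (pvAsciiLetters ++ pvDigits ++ ['.', '-']).contains (PySem.List.pyGetD cs i 'a')))
    = ((cs.foldl pvStep 0) == 1) := by
  cases cs with
  | nil => simp at h1
  | cons c0 t =>
    have hget0 : PySem.List.pyGetD (c0 :: t) 0 'a' = c0 := by
      simp [PySem.List.pyGetD_zero]
    rw [hget0, List.foldl_cons]
    have hstep0 : pvStep 0 c0 = if pvLetters.contains c0 then 1 else 3 := by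
      simp [pvStep]
    by_cases hL : pvAsciiLetters.contains c0 = true
    · rw [hstep0, if_pos (show pvLetters.contains c0 = true from hL), if_neg (by rw [hL]; decide)]
      rw [Bool.eq_iff_iff]
      simp only [beq_iff_eq]
      rw [pv_run12 t 1 (Or.inl rfl)]
      cases t with
      | nil =>
        have hlast : PySem.List.pyGetD [c0] (-1) 'a' = c0 := by
          rw [PySem.List.pyGetD_neg_one _ _ (by simp)]; rfl
        have hA : (pvAsciiLetters ++ pvDigits).contains c0 = true := pv_alnum_of_letters c0 hL
        rw [hlast, if_neg (by rw [hA]; decide)]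
        have hlen1 : ([c0] : List Char).length = 1 := rfl
        rw [hlen1]
        have hr : PySem.List.pyRange 1 (((1 : Nat) : Int) - 1) 1 = [] := by decide
        rw [hr]
        simp
      | cons c1 t' =>
        have hne : (c0 :: c1 :: t') ≠ ([] : List Char) := by simp
        have hne' : (c1 :: t') ≠ ([] : List Char) := by simp
        have hlast : PySem.List.pyGetD (c0 :: c1 :: t') (-1) 'a'
            = (c1 :: t').getLast hne' := by
          rw [PySem.List.pyGetD_neg_one _ _ hne]
          simp [List.getLast_cons hne']
        have hglq : (c1 :: t').getLast? = some ((c1 :: t').getLast hne') :=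
          List.getLast?_eq_some_getLast hne'
        rw [hlast, hglq]
        set L := (c1 :: t').getLast hne' with hLdef
        by_cases hA : (pvAsciiLetters ++ pvDigits).contains L = true
        · rw [if_neg (by rw [hA]; decide)]
          have hinnerL : (pvAsciiLetters ++ pvDigits ++ ['.', '-']).contains L = true :=
            pv_inner_of_alnum L hA
          constructor
          · intro hall
            refine ⟨?_, hA⟩
            intro c hc
            rw [List.mem_iff_getElem] at hc
            obtain ⟨j, hj, rfl⟩ := hc
            by_cases hjlast : j = (c1 :: t').length - 1
            · subst hjlast
              have hx : (c1 :: t')[(c1 :: t').length - 1]'(by omega) = L :=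
                (List.getLast_eq_getElem hne').symm
              rw [hx]; exact hinnerL
            · rw [List.all_eq_true] at hall
              have hmem : ((j + 1 : Nat) : Int) ∈ PySem.List.pyRange 1 (((c0 :: c1 :: t').length : Int) - 1) 1 := by
                rw [PySem.List.mem_pyRange_one]
                simp only [List.length_cons] at hj hjlast ⊢
                push_cast
                omega
              have hth := hall _ hmem
              simp only at hth
              rw [PySem.List.pyGetD_eq_getElem _ _ (by positivity)
                (by simp only [List.length_cons] at hj ⊢; push_cast; omega)] at hth
              simp only [Int.toNat_natCast, List.getElem_cons_succ] at hth
              exact hth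
          · rintro ⟨hall, -⟩
            rw [List.all_eq_true]
            intro i hi
            rw [PySem.List.mem_pyRange_one] at hi
            simp only [List.length_cons] at hi
            rw [PySem.List.pyGetD_eq_getElem _ _ (by omega)
              (by simp only [List.length_cons]; push_cast; omega)]
            obtain ⟨k, hk⟩ : ∃ k, i.toNat = k + 1 := ⟨i.toNat - 1, by omega⟩
            have hkb : k < (c1 :: t').length := by simp only [List.length_cons]; omega
            have hidx : ((c0 :: c1 :: t')[i.toNat]'(by simp; omega)) = (c1 :: t')[k]'hkb := by
              simp [hk]
            rw [hidx]
            exact hall _ (List.getElem_mem hkb)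
        · rw [if_pos (by rw [Bool.eq_false_iff.mpr hA]; decide)]
          constructor
          · intro h; exact absurd h (by decide)
          · rintro ⟨-, h2⟩; exact absurd h2 hA
    · have hLf : pvAsciiLetters.contains c0 = false := Bool.eq_false_iff.mpr hL
      rw [hstep0, if_neg (show ¬ pvLetters.contains c0 = true from hL), pv_run3]
      rw [if_pos (by rw [hLf]; decide)]
      decide

-- ===== VERDICT (by name: the statement is the Claim_ definition above) =====
theorem check_login_spec : Claim_equal_check_login := by
  intro login _
  show check_login login = check_login_alt login
  unfold check_login check_login_alt
  dsimp only
  generalize login.toList = cs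
  by_cases hlen : (decide (0 < cs.length) && decide (cs.length < 21)) = true
  · have hg : ¬ ((!(decide (0 < cs.length) && decide (cs.length < 21))) = true) := by
      rw [hlen]; decide
    rw [if_neg hg, if_neg hg]
    simp only [Bool.and_eq_true, decide_eq_true_eq] at hlen
    exact pv_core cs hlen.1 hlen.2
  · have hf : (decide (0 < cs.length) && decide (cs.length < 21)) = false :=
      Bool.eq_false_iff.mpr hlen
    have hg : ((!(decide (0 < cs.length) && decide (cs.length < 21))) = true) := by
      rw [hf]; decide
    rw [if_pos hg, if_pos hg]
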